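-- pv_equiv track=rewrite | github.com/Jegan2005-jp/resume-analyzer | app.py | infer_seniority
-- ===== SOURCE A (Python) =====
-- def infer_seniority(lower: str) -> str:
--     """
--     Rough seniority inference from wording.
--     """
--     if any(w in lower for w in ["intern", "trainee", "fresher"]):
--         return "Entry / Intern"
--     if "junior" in lower or "graduate" in lower:
--         return "Junior"
--     if any(w in lower for w in ["senior", "sr.", "sr "]):
--         return "Senior"
--     if any(w in lower for w in ["lead", "principal"]):
--         return "Lead"
--     if any(w in lower for w in ["manager", "head of", "director"]):
--         return "Manager / Director"
--     # Default for generic resumes without explicit titles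
--     return "Early Career"
-- ===== SOURCE B (Python) =====
-- # B: single left-to-right scan over text positions maintaining the minimum
-- # matched seniority rank (multi-pattern scan), then index into a label table.
-- KEYWORDS = [
--     ("intern", 0), ("trainee", 0), ("fresher", 0),
--     ("junior", 1), ("graduate", 1),
--     ("senior", 2), ("sr.", 2), ("sr ", 2),
--     ("lead", 3), ("principal", 3),
--     ("manager", 4), ("head of", 4), ("director", 4),
-- ]
-- LABELS = ["Entry / Intern", "Junior", "Senior", "Lead", "Manager / Director", "Early Career"]
--
-- def infer_seniority(lower: str) -> str:
--     """
--     Rough seniority inference from wording.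
--     """
--     best = 5
--     for i in range(len(lower)):
--         for w, rank in KEYWORDS:
--             if rank < best and lower.startswith(w, i):
--                 best = rank
--     return LABELS[best]
-- ===== Notes on version B (the rewrite author's own statement) =====
-- stated objective: alternative
-- what changed: Instead of five ordered per-keyword substring searches, B makes a single left-to-right scan over the text positions, checking at each position which keyword starts there and keeping the minimum matched rank, then indexes a label table by that rank.
import Mathlib
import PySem

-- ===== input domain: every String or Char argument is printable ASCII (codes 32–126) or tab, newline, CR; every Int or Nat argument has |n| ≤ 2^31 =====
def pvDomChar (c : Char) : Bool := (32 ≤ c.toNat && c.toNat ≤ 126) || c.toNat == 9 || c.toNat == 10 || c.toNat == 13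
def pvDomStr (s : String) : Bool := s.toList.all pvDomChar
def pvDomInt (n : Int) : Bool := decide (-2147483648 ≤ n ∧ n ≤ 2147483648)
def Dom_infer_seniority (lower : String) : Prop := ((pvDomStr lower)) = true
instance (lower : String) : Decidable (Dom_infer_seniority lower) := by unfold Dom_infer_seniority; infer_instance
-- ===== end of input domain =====

-- B replaces A's ordered per-keyword substring searches with a single scan over text
-- positions keeping the minimum matched rank, then a label-table lookup (alternative).

-- ===== PORT A =====
def infer_seniority (lower : String) : String :=
  if ["intern", "trainee", "fresher"].any (fun w => PySem.Str.isIn w lower) then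
    "Entry / Intern"
  else if PySem.Str.isIn "junior" lower || PySem.Str.isIn "graduate" lower then
    "Junior"
  else if ["senior", "sr.", "sr "].any (fun w => PySem.Str.isIn w lower) then
    "Senior"
  else if ["lead", "principal"].any (fun w => PySem.Str.isIn w lower) then
    "Lead"
  else if ["manager", "head of", "director"].any (fun w => PySem.Str.isIn w lower) then
    "Manager / Director"
  else
    "Early Career"

-- ===== PORT B =====
def pvKeywords : List (String × Nat) :=
  [ ("intern", 0), ("trainee", 0), ("fresher", 0),
    ("junior", 1), ("graduate", 1),
    ("senior", 2), ("sr.", 2), ("sr ", 2),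
    ("lead", 3), ("principal", 3),
    ("manager", 4), ("head of", 4), ("director", 4) ]

def pvLabels : List String :=
  ["Entry / Intern", "Junior", "Senior", "Lead", "Manager / Director", "Early Career"]

-- inner loop of Source B: fold the keyword table at one position i
-- (Python's lower.startswith(w, i) with 0 ≤ i ≤ len(lower) is exactly startswith on the drop)
def pvInner (L : List Char) (i : Nat) (K : List (String × Nat)) (b : Nat) : Nat :=
  K.foldl (fun b wr =>
    if wr.2 < b ∧ PySem.Chars.startswith (L.drop i) wr.1.toList = true then wr.2 else b) b

-- outer loop of Source B: fold over the positions range(len(lower))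
def pvScanAux (L : List Char) (P : List Nat) (b : Nat) : Nat :=
  P.foldl (fun b i => pvInner L i pvKeywords b) b

def infer_seniority_alt (lower : String) : String :=
  pvLabels.getD (pvScanAux lower.toList (List.range lower.toList.length) 5) ""

-- ===== PRECONDITION & SPEC =====
def Spec_infer_seniority (lower : String) (out : String) : Prop := out = infer_seniority_alt lower
instance (lower : String) (out : String) : Decidable (Spec_infer_seniority lower out) := by unfold Spec_infer_seniority; infer_instance

-- ===== CLAIM (what is proved, stated in full; the proofs are below) =====
def Claim_equal_infer_seniority : Prop := ∀ (lower : String), Dom_infer_seniority lower → Spec_infer_seniority lower (infer_seniority lower)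

-- ===== LEMMAS AND PROOFS =====

-- "keyword w occurs starting at some scanned position of L"
def pvMatch (L : List Char) (w : String) : Prop :=
  ∃ i, i ∈ List.range L.length ∧ PySem.Chars.startswith (L.drop i) w.toList = true

theorem pvInner_cons (L : List Char) (i : Nat) (hd : String × Nat)
    (tl : List (String × Nat)) (b : Nat) :
    pvInner L i (hd :: tl) b =
      pvInner L i tl
        (if hd.2 < b ∧ PySem.Chars.startswith (L.drop i) hd.1.toList = true then hd.2 else b) :=
  rfl

theorem pvScanAux_cons (L : List Char) (hd : Nat) (tl : List Nat) (b : Nat) :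
    pvScanAux L (hd :: tl) b = pvScanAux L tl (pvInner L hd pvKeywords b) := by
  simp only [pvScanAux, List.foldl_cons]

theorem pvInner_le (L : List Char) (i : Nat) (K : List (String × Nat)) (b : Nat) :
    pvInner L i K b ≤ b := by
  induction K generalizing b with
  | nil => simp [pvInner]
  | cons hd tl ih =>
      rw [pvInner_cons]
      split_ifs with h
      · exact le_trans (ih _) (le_of_lt h.1)
      · exact ih b

theorem pvInner_le_of_match (L : List Char) (i : Nat) (K : List (String × Nat)) (b : Nat)
    (w : String) (r : Nat) (hmem : (w, r) ∈ K)
    (hsw : PySem.Chars.startswith (L.drop i) w.toList = true) :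
    pvInner L i K b ≤ r := by
  induction K generalizing b with
  | nil => simp at hmem
  | cons hd tl ih =>
      rcases List.mem_cons.mp hmem with h | h
      · subst h
        rw [pvInner_cons]
        split_ifs with hc
        · exact pvInner_le L i tl r
        · have hbr : b ≤ r := by
            rcases Nat.lt_or_ge r b with hlt | hge
            · exact absurd ⟨hlt, hsw⟩ hc
            · exact hge
          exact le_trans (pvInner_le L i tl b) hbr
      · rw [pvInner_cons]
        exact ih _ h

theorem pvInner_cases (L : List Char) (i : Nat) (K : List (String × Nat)) (b : Nat) :
    pvInner L i K b = b ∨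
    ∃ w r, (w, r) ∈ K ∧ pvInner L i K b = r ∧
      PySem.Chars.startswith (L.drop i) w.toList = true := by
  induction K generalizing b with
  | nil => left; simp [pvInner]
  | cons hd tl ih =>
      rw [pvInner_cons]
      split_ifs with hc
      · right
        rcases ih hd.2 with h | ⟨w, r, hm, he, hs⟩
        · exact ⟨hd.1, hd.2, List.mem_cons_self .., h, hc.2⟩
        · exact ⟨w, r, List.mem_cons_of_mem _ hm, he, hs⟩
      · rcases ih b with h | ⟨w, r, hm, he, hs⟩
        · left; exact h
        · right; exact ⟨w, r, List.mem_cons_of_mem _ hm, he, hs⟩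

theorem pvScanAux_le (L : List Char) (P : List Nat) (b : Nat) :
    pvScanAux L P b ≤ b := by
  induction P generalizing b with
  | nil => simp [pvScanAux]
  | cons hd tl ih =>
      rw [pvScanAux_cons]
      exact le_trans (ih _) (pvInner_le L hd pvKeywords b)

theorem pvScanAux_le_of_match (L : List Char) (P : List Nat) (b : Nat)
    (i : Nat) (w : String) (r : Nat) (hmem : (w, r) ∈ pvKeywords)
    (hsw : PySem.Chars.startswith (L.drop i) w.toList = true) (hi : i ∈ P) :
    pvScanAux L P b ≤ r := by
  induction P generalizing b with
  | nil => simp at hi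
  | cons hd tl ih =>
      rw [pvScanAux_cons]
      rcases List.mem_cons.mp hi with h | h
      · subst h
        exact le_trans (pvScanAux_le L tl _) (pvInner_le_of_match L i pvKeywords b w r hmem hsw)
      · exact ih _ h

theorem pvScanAux_cases (L : List Char) (P : List Nat) (b : Nat) :
    pvScanAux L P b = b ∨
    ∃ i, i ∈ P ∧ ∃ w r, (w, r) ∈ pvKeywords ∧ pvScanAux L P b = r ∧
      PySem.Chars.startswith (L.drop i) w.toList = true := by
  induction P generalizing b with
  | nil => left; simp [pvScanAux]
  | cons hd tl ih =>
      rw [pvScanAux_cons]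
      rcases ih (pvInner L hd pvKeywords b) with h | ⟨i, hi, w, r, hm, he, hs⟩
      · rcases pvInner_cases L hd pvKeywords b with h' | ⟨w, r, hm, he, hs⟩
        · left; rw [h, h']
        · right; exact ⟨hd, List.mem_cons_self .., w, r, hm, h.trans he, hs⟩
      · right; exact ⟨i, List.mem_cons_of_mem _ hi, w, r, hm, he, hs⟩

theorem pvMatch_iff (lower w : String) (hw : w.toList ≠ []) :
    pvMatch lower.toList w ↔ PySem.Str.isIn w lower = true := by
  rw [PySem.Str.isIn_iff_infix, ← PySem.Chars.isIn_iff_infix,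
    ← PySem.Chars.exists_prefix_drop_iff_isIn]
  constructor
  · rintro ⟨i, _, hs⟩
    exact ⟨i, (PySem.Chars.startswith_iff _ _).mp hs⟩
  · rintro ⟨j, hj⟩
    by_cases hjl : j < lower.toList.length
    · exact ⟨j, List.mem_range.mpr hjl, (PySem.Chars.startswith_iff _ _).mpr hj⟩
    · exfalso
      have hnil : lower.toList.drop j = [] := List.drop_eq_nil_of_le (le_of_not_gt hjl)
      rw [hnil] at hj
      exact hw (List.prefix_nil.mp hj)

theorem pvKeywords_ne (wr : String × Nat) (h : wr ∈ pvKeywords) : wr.1.toList ≠ [] := by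
  fin_cases h <;> decide

theorem pvKeywords_rank (wr : String × Nat) (h : wr ∈ pvKeywords) : wr.2 ≤ 4 := by
  fin_cases h <;> decide

-- B's scan equals rank k when some rank-k keyword occurs and no lower-rank keyword does
theorem pvScan_eq (lower : String) (k : Nat)
    (hex : ∃ w, (w, k) ∈ pvKeywords ∧ PySem.Str.isIn w lower = true)
    (hmin : ∀ w r, (w, r) ∈ pvKeywords → r < k → PySem.Str.isIn w lower = false) :
    pvScanAux lower.toList (List.range lower.toList.length) 5 = k := by
  obtain ⟨w, hmem, hIn⟩ := hex
  obtain ⟨i, hi, hsw⟩ := (pvMatch_iff lower w (pvKeywords_ne (w, k) hmem)).mpr hIn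
  have hle : pvScanAux lower.toList (List.range lower.toList.length) 5 ≤ k :=
    pvScanAux_le_of_match _ _ _ i w k hmem hsw hi
  rcases pvScanAux_cases lower.toList (List.range lower.toList.length) 5 with
    h | ⟨i', hi', w', r', hm', he', hs'⟩
  · have hk4 : k ≤ 4 := pvKeywords_rank (w, k) hmem
    omega
  · have hr'k : r' ≤ k := he' ▸ hle
    rcases Nat.lt_or_ge r' k with hlt | hge
    · exfalso
      have hIn' : PySem.Str.isIn w' lower = true :=
        (pvMatch_iff lower w' (pvKeywords_ne (w', r') hm')).mp ⟨i', hi', hs'⟩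
      rw [hmin w' r' hm' hlt] at hIn'
      exact Bool.false_ne_true hIn'
    · rw [he']; omega

-- B's scan equals 5 when no keyword occurs
theorem pvScan_eq_five (lower : String)
    (hmin : ∀ w r, (w, r) ∈ pvKeywords → PySem.Str.isIn w lower = false) :
    pvScanAux lower.toList (List.range lower.toList.length) 5 = 5 := by
  rcases pvScanAux_cases lower.toList (List.range lower.toList.length) 5 with
    h | ⟨i', hi', w', r', hm', he', hs'⟩
  · exact h
  · exfalso
    have hIn' : PySem.Str.isIn w' lower = true :=
      (pvMatch_iff lower w' (pvKeywords_ne (w', r') hm')).mp ⟨i', hi', hs'⟩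
    rw [hmin w' r' hm'] at hIn'
    exact Bool.false_ne_true hIn'

-- ===== VERDICT (by name: the statement is the Claim_ definition above) =====
set_option maxHeartbeats 2000000 in
theorem infer_seniority_spec : Claim_equal_infer_seniority := by
  intro lower _
  unfold Spec_infer_seniority infer_seniority infer_seniority_alt
  by_cases h0 : ["intern", "trainee", "fresher"].any (fun w => PySem.Str.isIn w lower) = true
  · obtain ⟨w, hw, hIn⟩ := List.any_eq_true.mp h0
    rw [if_pos h0, pvScan_eq lower 0 ⟨w, by fin_cases hw <;> decide, hIn⟩
      (by intro w r _ hr; omega)]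
    rfl
  · have e0 : ∀ w ∈ (["intern", "trainee", "fresher"] : List String),
        PySem.Str.isIn w lower = false := by
      intro w hw
      cases hb : PySem.Str.isIn w lower with
      | false => rfl
      | true => exact absurd (List.any_eq_true.mpr ⟨w, hw, hb⟩) h0
    rw [if_neg h0]
    by_cases h1 : (PySem.Str.isIn "junior" lower || PySem.Str.isIn "graduate" lower) = true
    · have hex : ∃ w, (w, 1) ∈ pvKeywords ∧ PySem.Str.isIn w lower = true := by
        rcases Bool.or_eq_true _ _ ▸ h1 with h | h
        · exact ⟨"junior", by decide, h⟩
        · exact ⟨"graduate", by decide, h⟩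
      rw [if_pos h1, pvScan_eq lower 1 hex (by
        intro w r hm hr
        fin_cases hm <;>
          first
            | omega
            | exact e0 _ (by decide))]
      rfl
    · have e1 : PySem.Str.isIn "junior" lower = false ∧
          PySem.Str.isIn "graduate" lower = false := by
        constructor
        · cases hb : PySem.Str.isIn "junior" lower with
          | false => rfl
          | true => exact absurd ((Bool.or_eq_true _ _).mpr (Or.inl hb)) h1
        · cases hb : PySem.Str.isIn "graduate" lower with
          | false => rfl
          | true => exact absurd ((Bool.or_eq_true _ _).mpr (Or.inr hb)) h1
      rw [if_neg h1]
      by_cases h2 : ["senior", "sr.", "sr "].any (fun w => PySem.Str.isIn w lower) = true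
      · obtain ⟨w, hw, hIn⟩ := List.any_eq_true.mp h2
        rw [if_pos h2, pvScan_eq lower 2 ⟨w, by fin_cases hw <;> decide, hIn⟩ (by
          intro w r hm hr
          fin_cases hm <;>
            first
              | omega
              | exact e0 _ (by decide)
              | exact e1.1
              | exact e1.2)]
        rfl
      · have e2 : ∀ w ∈ (["senior", "sr.", "sr "] : List String),
            PySem.Str.isIn w lower = false := by
          intro w hw
          cases hb : PySem.Str.isIn w lower with
          | false => rfl
          | true => exact absurd (List.any_eq_true.mpr ⟨w, hw, hb⟩) h2
        rw [if_neg h2]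
        by_cases h3 : ["lead", "principal"].any (fun w => PySem.Str.isIn w lower) = true
        · obtain ⟨w, hw, hIn⟩ := List.any_eq_true.mp h3
          rw [if_pos h3, pvScan_eq lower 3 ⟨w, by fin_cases hw <;> decide, hIn⟩ (by
            intro w r hm hr
            fin_cases hm <;>
              first
                | omega
                | exact e0 _ (by decide)
                | exact e1.1
                | exact e1.2
                | exact e2 _ (by decide))]
          rfl
        · have e3 : ∀ w ∈ (["lead", "principal"] : List String),
              PySem.Str.isIn w lower = false := by
            intro w hw
            cases hb : PySem.Str.isIn w lower with
            | false => rfl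
            | true => exact absurd (List.any_eq_true.mpr ⟨w, hw, hb⟩) h3
          rw [if_neg h3]
          by_cases h4 : ["manager", "head of", "director"].any
              (fun w => PySem.Str.isIn w lower) = true
          · obtain ⟨w, hw, hIn⟩ := List.any_eq_true.mp h4
            rw [if_pos h4, pvScan_eq lower 4 ⟨w, by fin_cases hw <;> decide, hIn⟩ (by
              intro w r hm hr
              fin_cases hm <;>
                first
                  | omega
                  | exact e0 _ (by decide)
                  | exact e1.1
                  | exact e1.2
                  | exact e2 _ (by decide)
                  | exact e3 _ (by decide))]
            rfl
          · have e4 : ∀ w ∈ (["manager", "head of", "director"] : List String),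
                PySem.Str.isIn w lower = false := by
              intro w hw
              cases hb : PySem.Str.isIn w lower with
              | false => rfl
              | true => exact absurd (List.any_eq_true.mpr ⟨w, hw, hb⟩) h4
            rw [if_neg h4, pvScan_eq_five lower (by
              intro w r hm
              fin_cases hm <;>
                first
                  | exact e0 _ (by decide)
                  | exact e1.1
                  | exact e1.2
                  | exact e2 _ (by decide)
                  | exact e3 _ (by decide)
                  | exact e4 _ (by decide))]
            rfl
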